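-- pv_equiv track=rewrite | github.com/tiendm1991/python | DynamicPrograming/deleteDigit.py | deleteDigit
-- ===== SOURCE A (Python) =====
-- def deleteDigit(n):
--     s = str(n)
--     a = [int(x) for x in s]
--     n = len(a)
--     dp = [0 for i in range(n)]
--     x = a[0]
--     for i in range(1, n):
--         dp[i] = max(dp[i - 1] * 10 + a[i], x)
--         x = x * 10 + a[i]
--     return dp[n - 1]
-- ===== SOURCE B (Python) =====
-- def deleteDigit(n):
--     a = [int(x) for x in str(n)]
--     best = 0
--     for i in range(len(a)):
--         v = 0
--         for j, d in enumerate(a):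
--             if j != i:
--                 v = v * 10 + d
--         best = max(best, v)
--     return best
-- ===== Notes on version B (the rewrite author's own statement) =====
-- stated objective: alternative
-- what changed: Replaces the one-pass DP recurrence dp[i]=max(dp[i-1]*10+a[i], prefix) by a direct brute force: build the numeric value of each delete-one-digit candidate and take the running maximum.
import Mathlib
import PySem

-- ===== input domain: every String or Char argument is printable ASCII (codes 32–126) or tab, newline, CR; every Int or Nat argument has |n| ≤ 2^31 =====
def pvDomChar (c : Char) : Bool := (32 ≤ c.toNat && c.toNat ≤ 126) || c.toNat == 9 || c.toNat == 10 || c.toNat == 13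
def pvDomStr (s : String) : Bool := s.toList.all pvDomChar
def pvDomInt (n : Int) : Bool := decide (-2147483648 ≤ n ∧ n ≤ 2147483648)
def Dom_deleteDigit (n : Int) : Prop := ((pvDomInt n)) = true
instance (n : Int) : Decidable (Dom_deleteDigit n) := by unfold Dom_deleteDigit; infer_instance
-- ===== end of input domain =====

-- B replaces A's one-pass DP recurrence by a direct brute force over the delete-one-digit
-- candidates (an alternative decomposition, not faster); equivalence is proved for 0 ≤ n,
-- where the Python A returns (for n < 0 both Pythons raise ValueError at int('-')).

-- ===== PORT A =====
-- a[0] and the dp[i] accesses are always in range (str(n) is nonempty, i ∈ range(1, n)),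
-- so the total forms pyGetD/pySetD are exact here.
def deleteDigit (n : Int) : Int :=
  let s := PySem.Int.toStr n
  let a : List Int := s.toList.map (fun x => (PySem.Int.ofStr? (String.ofList [x])).getD 0)
  let m : Int := PySem.List.len a
  let dp : List Int := (PySem.List.pyRange 0 m 1).map (fun _ => 0)
  let x : Int := PySem.List.pyGetD a 0 0
  let st := (PySem.List.pyRange 1 m 1).foldl
    (fun (st : List Int × Int) i =>
      (PySem.List.pySetD st.1 i (max (PySem.List.pyGetD st.1 (i - 1) 0 * 10 + PySem.List.pyGetD a i 0) st.2),
       st.2 * 10 + PySem.List.pyGetD a i 0))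
    (dp, x)
  PySem.List.pyGetD st.1 (m - 1) 0

-- ===== PORT B =====
def deleteDigit_alt (n : Int) : Int :=
  let a : List Int := (PySem.Int.toStr n).toList.map (fun x => (PySem.Int.ofStr? (String.ofList [x])).getD 0)
  (PySem.List.pyRange 0 (PySem.List.len a) 1).foldl
    (fun best i =>
      max best ((PySem.List.enumerate a).foldl
        (fun v jd => if jd.1 ≠ i then v * 10 + jd.2 else v) 0))
    0

-- ===== PRECONDITION & SPEC =====
-- Pre_ excludes n < 0, on which the Python A (and B) raises ValueError at int('-').
def Pre_deleteDigit (n : Int) : Prop := 0 ≤ n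
instance (n : Int) : Decidable (Pre_deleteDigit n) := by unfold Pre_deleteDigit; infer_instance
def pvWitness_deleteDigit : Int := 132

def Spec_deleteDigit (n : Int) (out : Int) : Prop := out = deleteDigit_alt n
instance (n : Int) (out : Int) : Decidable (Spec_deleteDigit n out) := by unfold Spec_deleteDigit; infer_instance

-- ===== CLAIM (what is proved, stated in full; the proofs are below) =====
def Claim_equal_deleteDigit : Prop := ∀ (n : Int), Dom_deleteDigit n → Pre_deleteDigit n → Spec_deleteDigit n (deleteDigit n)

-- ===== LEMMAS AND PROOFS =====

-- the numeric value of a digit list, folded from a given accumulator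
def pvValFrom (v : Int) (l : List Int) : Int := l.foldl (fun v d => v * 10 + d) v
def pvVal (l : List Int) : Int := pvValFrom 0 l
-- max (with 0) over the values of the delete-one-digit candidates of l
def pvDel (l : List Int) : Int := (List.range l.length).foldl (fun b j => max b (pvVal (l.eraseIdx j))) 0
def pvDIG : List Char := ['0','1','2','3','4','5','6','7','8','9']
def pvDigits (n : Int) : List Int :=
  (PySem.Int.toStr n).toList.map (fun x => (PySem.Int.ofStr? (String.ofList [x])).getD 0)

theorem pvValFrom_append_singleton (v : Int) (l : List Int) (d : Int) :
    pvValFrom v (l ++ [d]) = pvValFrom v l * 10 + d := by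
  simp [pvValFrom, List.foldl_append]

theorem pvValFrom_nonneg (v : Int) (l : List Int) (hv : 0 ≤ v) (h : ∀ d ∈ l, 0 ≤ d) :
    0 ≤ pvValFrom v l := by
  induction l generalizing v with
  | nil => simpa [pvValFrom] using hv
  | cons x t ih =>
    have hx : 0 ≤ x := h x (by simp)
    have hvx : 0 ≤ v * 10 + x := by omega
    simpa [pvValFrom] using ih (v * 10 + x) hvx (fun d hd => h d (by simp [hd]))

theorem pvVal_nonneg (l : List Int) (h : ∀ d ∈ l, 0 ≤ d) : 0 ≤ pvVal l :=
  pvValFrom_nonneg 0 l le_rfl h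

-- the inner enumerate-and-skip loop of B computes the value of the list with index i removed
theorem pvEnumSkip (a : List Int) : ∀ (s i v : Int),
    (PySem.List.enumerate a s).foldl (fun v jd => if jd.1 ≠ i then v * 10 + jd.2 else v) v
    = if s ≤ i ∧ i < s + a.length then pvValFrom v (a.eraseIdx (i - s).toNat) else pvValFrom v a := by
  induction a with
  | nil =>
    intro s i v
    rw [if_neg (by simp only [List.length_nil]; push_cast; omega)]
    simp [PySem.List.enumerate_nil, pvValFrom]
  | cons x t ih =>
    intro s i v
    rw [PySem.List.enumerate_cons, List.foldl_cons]
    by_cases hsi : s = i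
    · subst hsi
      rw [if_neg (by simp), ih (s + 1) s v,
          if_neg (by omega),
          if_pos (by refine ⟨le_rfl, ?_⟩; simp only [List.length_cons]; push_cast; omega)]
      rw [show (s - s).toNat = 0 by omega, List.eraseIdx_cons_zero]
    · rw [if_pos (by simpa using hsi), ih (s + 1) i (v * 10 + x)]
      by_cases h1 : s ≤ i ∧ i < s + ((x :: t).length : Int)
      · rw [if_pos (by simp only [List.length_cons] at h1 ⊢; push_cast at h1 ⊢; omega), if_pos h1,
            show (i - s).toNat = (i - (s + 1)).toNat + 1 by
              simp only [List.length_cons] at h1; push_cast at h1; omega,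
            List.eraseIdx_cons_succ]
        simp [pvValFrom]
      · rw [if_neg (by simp only [List.length_cons] at h1 ⊢; push_cast at h1 ⊢; omega), if_neg h1]
        simp [pvValFrom]

theorem pvFoldlMaxAffine (t : List Int) : ∀ (x d : Int),
    List.foldl max (x * 10 + d) (t.map (fun y => y * 10 + d)) = (List.foldl max x t) * 10 + d := by
  induction t with
  | nil => intro x d; simp
  | cons y yt ih =>
    intro x d
    simp only [List.map_cons, List.foldl_cons]
    rw [show max (x * 10 + d) (y * 10 + d) = (max x y) * 10 + d by
          rcases le_total x y with h | h
          · rw [max_eq_right h, max_eq_right (by omega)]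
          · rw [max_eq_left h, max_eq_left (by omega)],
        ih]

theorem pvFoldlMaxAbsorb (z : Int) (t : List Int) (hz : 0 ≤ z) :
    List.foldl max 0 (z :: t) = List.foldl max z t := by
  simp [List.foldl_cons, max_eq_right hz]

theorem pvDel_singleton (x : Int) : pvDel [x] = 0 := by
  simp [pvDel, pvVal, pvValFrom]

theorem pvDel_append (l : List Int) (d : Int) (hl : l ≠ []) (hnn : ∀ x ∈ l, 0 ≤ x) (hd : 0 ≤ d) :
    pvDel (l ++ [d]) = max (pvDel l * 10 + d) (pvVal l) := by
  obtain ⟨p, hp⟩ : ∃ p, l.length = p + 1 := ⟨l.length - 1, by cases l <;> simp_all⟩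
  have h0 : 0 ≤ pvVal (l.eraseIdx 0) := pvVal_nonneg _ (fun x hx => hnn x (List.eraseIdx_subset hx))
  unfold pvDel
  rw [show (l ++ [d]).length = (p + 1) + 1 by simp [hp], hp]
  rw [List.range_succ, List.foldl_append, List.foldl_cons, List.foldl_nil]
  rw [show (l ++ [d]).eraseIdx (p + 1) = l by
        rw [← hp, List.eraseIdx_append_of_length_le (Nat.le_refl l.length)]; simp]
  rw [PySem.List.foldl_congr_mem _ _ (fun b j => max b (pvVal (l.eraseIdx j) * 10 + d)) 0
        (by
          intro acc j hj
          have hj' : j < l.length := by rw [hp]; exact List.mem_range.mp hj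
          rw [List.eraseIdx_append_of_lt_length hj',
              show pvVal (l.eraseIdx j ++ [d]) = pvVal (l.eraseIdx j) * 10 + d from
                pvValFrom_append_singleton 0 _ d])]
  rw [show (List.range (p + 1)).foldl (fun b j => max b (pvVal (l.eraseIdx j) * 10 + d)) 0
        = ((List.range (p + 1)).map (fun j => pvVal (l.eraseIdx j) * 10 + d)).foldl max 0 from
        List.foldl_map.symm,
      show (List.range (p + 1)).foldl (fun b j => max b (pvVal (l.eraseIdx j))) 0
        = ((List.range (p + 1)).map (fun j => pvVal (l.eraseIdx j))).foldl max 0 from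
        List.foldl_map.symm]
  rw [List.range_succ_eq_map]
  simp only [List.map_cons, List.map_map, Function.comp_def, Nat.succ_eq_add_one]
  rw [pvFoldlMaxAbsorb _ _ (by omega), pvFoldlMaxAbsorb _ _ h0]
  rw [show (List.range p).map (fun k => pvVal (l.eraseIdx (k + 1)) * 10 + d)
        = ((List.range p).map (fun k => pvVal (l.eraseIdx (k + 1)))).map (fun y => y * 10 + d) by
        simp [List.map_map, Function.comp_def]]
  rw [pvFoldlMaxAffine]

-- A's loop invariant: after processing range(1, k) the dp slots below k hold the
-- delete-one-digit maxima of the prefixes, and the running x is the prefix value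
theorem pvALoop (a : List Int) (ha : ∀ x ∈ a, 0 ≤ x) :
    ∀ (k : Nat), 1 ≤ k → k ≤ a.length →
    (PySem.List.pyRange 1 (k : Int) 1).foldl
      (fun (st : List Int × Int) i =>
        (PySem.List.pySetD st.1 i (max (PySem.List.pyGetD st.1 (i - 1) 0 * 10 + PySem.List.pyGetD a i 0) st.2),
         st.2 * 10 + PySem.List.pyGetD a i 0))
      ((PySem.List.pyRange 0 ((a.length : Int)) 1).map (fun _ => 0), PySem.List.pyGetD a 0 0)
    = ((List.range a.length).map (fun p => if p < k then pvDel (a.take (p + 1)) else 0), pvVal (a.take k)) := by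
  intro k hk1
  induction k, hk1 using Nat.le_induction with
  | base =>
    intro hk2
    rw [PySem.List.pyRange_one_eq_nil (a := 1) (b := ((1 : Nat) : Int)) (by norm_num), List.foldl_nil]
    obtain ⟨x, t, rfl⟩ : ∃ x t, a = x :: t := by
      cases a with
      | nil => simp at hk2
      | cons x t => exact ⟨x, t, rfl⟩
    rw [Prod.mk.injEq]
    constructor
    · rw [PySem.List.pyRange_zero_nat, List.map_map]
      apply List.map_congr_left
      intro p _
      by_cases hp1 : p < 1
      · rw [show p = 0 by omega]
        simp [pvDel_singleton]
      · simp [hp1]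
    · rw [PySem.List.pyGetD_zero_cons]
      simp [pvVal, pvValFrom]
  | succ k hk ih =>
    intro hk2
    have hkl : k < a.length := by omega
    have ihr := ih (by omega)
    rw [show ((k + 1 : Nat) : Int) = ((k : Nat) : Int) + 1 by push_cast; ring,
        PySem.List.pyRange_one_succ_right (by exact_mod_cast hk),
        List.foldl_append, ihr]
    simp only [List.foldl_cons, List.foldl_nil]
    have hgetA : PySem.List.pyGetD a ((k : Nat) : Int) 0 = a[k] := by
      rw [PySem.List.pyGetD_natCast, List.getD_eq_getElem a 0 hkl]
    have hdpk1 : PySem.List.pyGetD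
        ((List.range a.length).map (fun p => if p < k then pvDel (a.take (p + 1)) else 0))
        (((k : Nat) : Int) - 1) 0 = pvDel (a.take k) := by
      rw [show (((k : Nat) : Int) - 1) = ((k - 1 : Nat) : Int) by omega,
          PySem.List.pyGetD_natCast,
          List.getD_eq_getElem _ _ (by simp only [List.length_map, List.length_range]; omega)]
      simp only [List.getElem_map, List.getElem_range]
      rw [if_pos (by omega), show k - 1 + 1 = k by omega]
    have htake : a.take (k + 1) = a.take k ++ [a[k]] := by
      rw [List.take_add_one]
      simp [List.getElem?_eq_getElem hkl]
    have hne : a.take k ≠ [] := by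
      have hl : (a.take k).length = k := by simp; omega
      intro h
      rw [h] at hl
      simp at hl
      omega
    have hnn : ∀ x ∈ a.take k, 0 ≤ x := fun x hx => ha x (List.take_subset _ _ hx)
    have hdk : 0 ≤ a[k] := ha _ (List.getElem_mem hkl)
    rw [Prod.mk.injEq]
    constructor
    · rw [hdpk1, hgetA, show max (pvDel (a.take k) * 10 + a[k]) (pvVal (a.take k)) = pvDel (a.take (k + 1)) by
            rw [htake, pvDel_append _ _ hne hnn hdk]]
      rw [show PySem.List.pySetD
            ((List.range a.length).map (fun p => if p < k then pvDel (a.take (p + 1)) else 0))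
            ((k : Nat) : Int) (pvDel (a.take (k + 1)))
          = ((List.range a.length).map (fun p => if p < k then pvDel (a.take (p + 1)) else 0)).set k
              (pvDel (a.take (k + 1))) by
            rw [PySem.List.pySetD, PySem.List.pySet?_natCast _ _ _ (by simpa using hkl)]
            rfl]
      apply List.ext_getElem
      · simp
      · intro p hp1 hp2
        simp only [List.getElem_set, List.getElem_map, List.getElem_range]
        by_cases hpk : k = p
        · subst hpk
          rw [if_pos rfl, if_pos (by omega)]
        · rw [if_neg hpk]
          split_ifs <;> first | rfl | omega
    · rw [hgetA, htake, show pvVal (a.take k ++ [a[k]]) = pvVal (a.take k) * 10 + a[k] from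
            pvValFrom_append_singleton 0 _ _]

theorem pvBEq (a : List Int) :
    (PySem.List.pyRange 0 ((a.length : Int)) 1).foldl
      (fun best i =>
        max best ((PySem.List.enumerate a).foldl
          (fun v jd => if jd.1 ≠ i then v * 10 + jd.2 else v) 0))
      0 = pvDel a := by
  rw [PySem.List.pyRange_zero_nat, List.foldl_map]
  unfold pvDel
  apply PySem.List.foldl_congr_mem
  intro acc j hj
  have hj' : j < a.length := List.mem_range.mp hj
  show max acc ((PySem.List.enumerate a).foldl
      (fun v jd => if jd.1 ≠ (j : Int) then v * 10 + jd.2 else v) 0)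
    = max acc (pvVal (a.eraseIdx j))
  rw [pvEnumSkip a 0 (j : Int) 0, if_pos (by omega),
      show ((j : Int) - 0).toNat = j by omega]
  rfl

theorem pvDigitChar_mem (m : Nat) (h : m < 10) : Nat.digitChar m ∈ pvDIG := by
  interval_cases m <;> decide

theorem pvToDigitsCore_digits : ∀ (f n : Nat) (l : List Char), (∀ c ∈ l, c ∈ pvDIG) →
    ∀ c ∈ Nat.toDigitsCore 10 f n l, c ∈ pvDIG := by
  intro f
  induction f with
  | zero => intro n l hl c hc; exact hl c (by simpa [Nat.toDigitsCore] using hc)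
  | succ f ih =>
    intro n l hl c hc
    simp only [Nat.toDigitsCore] at hc
    have hdig : Nat.digitChar (n % 10) ∈ pvDIG := pvDigitChar_mem _ (Nat.mod_lt n (by norm_num))
    split_ifs at hc with h
    · rcases List.mem_cons.mp hc with rfl | hcl
      · exact hdig
      · exact hl _ hcl
    · exact ih (n / 10) _ (by
        intro c' hc'
        rcases List.mem_cons.mp hc' with rfl | h'
        · exact hdig
        · exact hl _ h') c hc

theorem pvToDigitsCore_ne_nil : ∀ (f n : Nat) (l : List Char), l ≠ [] → Nat.toDigitsCore 10 f n l ≠ [] := by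
  intro f
  induction f with
  | zero => intro n l hl; simpa [Nat.toDigitsCore]
  | succ f ih =>
    intro n l hl
    simp only [Nat.toDigitsCore]
    split_ifs
    · simp
    · exact ih _ _ (by simp)

theorem pvToDigits_ne_nil (n : Nat) : Nat.toDigits 10 n ≠ [] := by
  show Nat.toDigitsCore 10 (n + 1) n [] ≠ []
  simp only [Nat.toDigitsCore]
  split_ifs
  · simp
  · exact pvToDigitsCore_ne_nil _ _ _ (by simp)

theorem pvToDigits_digits (n : Nat) : ∀ c ∈ Nat.toDigits 10 n, c ∈ pvDIG := by
  intro c hc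
  exact pvToDigitsCore_digits (n + 1) n [] (by simp) c hc

theorem pvDigitVal_nonneg (c : Char) (h : c ∈ pvDIG) :
    0 ≤ (PySem.Int.ofStr? (String.ofList [c])).getD 0 := by
  fin_cases h <;> decide

theorem pvDigits_spec (n : Int) (hn : 0 ≤ n) :
    (∀ x ∈ pvDigits n, 0 ≤ x) ∧ 1 ≤ (pvDigits n).length := by
  unfold pvDigits
  rw [PySem.Int.toList_toStr,
      show PySem.Int.toChars n = Nat.toDigits 10 n.toNat by
        rw [PySem.Int.toChars, if_neg (by omega)]]
  constructor
  · intro x hx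
    obtain ⟨c, hc, rfl⟩ := List.mem_map.mp hx
    exact pvDigitVal_nonneg c (pvToDigits_digits _ c hc)
  · rw [List.length_map]
    have := List.length_pos_of_ne_nil (pvToDigits_ne_nil n.toNat)
    omega

theorem pvAClosed (a : List Int) (ha : ∀ x ∈ a, 0 ≤ x) (hlen : 1 ≤ a.length) :
    PySem.List.pyGetD
      (((PySem.List.pyRange 1 ((a.length : Int)) 1).foldl
        (fun (st : List Int × Int) i =>
          (PySem.List.pySetD st.1 i (max (PySem.List.pyGetD st.1 (i - 1) 0 * 10 + PySem.List.pyGetD a i 0) st.2),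
           st.2 * 10 + PySem.List.pyGetD a i 0))
        ((PySem.List.pyRange 0 ((a.length : Int)) 1).map (fun _ => 0), PySem.List.pyGetD a 0 0)).1)
      ((a.length : Int) - 1) 0 = pvDel a := by
  rw [pvALoop a ha a.length hlen le_rfl]
  rw [show ((a.length : Int) - 1) = ((a.length - 1 : Nat) : Int) by omega,
      PySem.List.pyGetD_natCast,
      List.getD_eq_getElem _ _ (by simp only [List.length_map, List.length_range]; omega)]
  simp only [List.getElem_map, List.getElem_range]
  rw [if_pos (by omega), show a.length - 1 + 1 = a.length by omega, List.take_length]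

-- ===== VERDICT (by name: the statement is the Claim_ definition above) =====
theorem deleteDigit_spec : Claim_equal_deleteDigit := by
  unfold Claim_equal_deleteDigit
  intro n _ hn
  unfold Spec_deleteDigit
  obtain ⟨ha, hlen⟩ := pvDigits_spec n hn
  unfold pvDigits at ha hlen
  show deleteDigit n = deleteDigit_alt n
  unfold deleteDigit deleteDigit_alt
  simp only [PySem.List.len_eq]
  rw [pvAClosed _ ha hlen, pvBEq]
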